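-- pv_equiv track=rewrite | github.com/charsyam/simple_scrap | simple3/ch.py | find_near_value
-- ===== SOURCE A (Python) =====
-- VALUE_IDX = 2
--
-- HASH_IDX = 3
--
-- def find_near_value(continnum, h):
--     size = len(continnum)
--     begin = left = 0
--     end = right = size
--
--     while left < right:
--         middle = int(left + (right - left) / 2)
--         if continnum[middle][HASH_IDX] < h:
--             left = middle + 1
--         else:
--             right = middle
--
--     if right == end:
--         right = begin
--
--     return right, continnum[right][VALUE_IDX]
-- ===== SOURCE B (Python) =====
-- VALUE_IDX = 2
--
-- HASH_IDX = 3
--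
-- def find_near_value(continnum, h):
--     # divide-and-conquer on list segments instead of an index-pair loop
--     def locate(seg):
--         if not seg:
--             return 0
--         m = len(seg) // 2
--         if seg[m][HASH_IDX] < h:
--             return m + 1 + locate(seg[m + 1:])
--         return locate(seg[:m])
--
--     right = locate(continnum)
--     if right == len(continnum):
--         right = 0
--     return right, continnum[right][VALUE_IDX]
-- ===== Notes on version B (the rewrite author's own statement) =====
-- stated objective: alternative
-- what changed: Replaces the imperative while-loop over an index pair (left,right) with a recursive divide-and-conquer helper that splits the list itself into segments around the midpoint and recurses on a physical sublist.
-- outside the precondition, e.g. on find_near_value([[1, 2, 3], [4, 5, 6, 7]], 10): A returns (0, 3), B returns (0, 3)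
import Mathlib
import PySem

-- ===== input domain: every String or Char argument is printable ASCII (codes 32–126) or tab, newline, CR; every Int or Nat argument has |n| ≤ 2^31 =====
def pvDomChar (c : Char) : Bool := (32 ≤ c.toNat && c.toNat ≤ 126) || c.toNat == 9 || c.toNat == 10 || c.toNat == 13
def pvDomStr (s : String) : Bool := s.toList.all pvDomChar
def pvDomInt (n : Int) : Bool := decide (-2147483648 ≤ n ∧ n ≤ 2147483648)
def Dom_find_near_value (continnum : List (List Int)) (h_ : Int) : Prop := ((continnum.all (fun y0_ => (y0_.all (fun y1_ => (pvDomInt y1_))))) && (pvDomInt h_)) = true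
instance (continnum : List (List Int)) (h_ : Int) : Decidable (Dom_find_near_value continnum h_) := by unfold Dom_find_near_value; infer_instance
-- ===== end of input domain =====

-- B reformulates A's index-pair binary-search loop as a divide-and-conquer recursion on
-- physical sublists (objective: alternative decomposition, same result).

-- ===== PORT A =====
-- while left < right: … ; Python's `int(left + (right - left) / 2)` equals
-- left + (right-left)//2 for the non-negative in-range sizes here.
-- Row accesses continnum[middle][3] / continnum[right][2] are in range under
-- Pre_find_near_value, so List.getD is exact there.
def aLoop (c : List (List Int)) (h_ : Int) : Nat → Nat → Nat → Nat
  | 0, _, right => right          -- fuel only guards totality: right - left ≤ fuel always holds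
  | fuel + 1, left, right =>
    if left < right then
      let middle := left + (right - left) / 2
      if (c.getD middle []).getD 3 0 < h_ then
        aLoop c h_ fuel (middle + 1) right
      else
        aLoop c h_ fuel left middle
    else right

def find_near_value (continnum : List (List Int)) (h_ : Int) : Int × Int :=
  let size := continnum.length
  let right := aLoop continnum h_ size 0 size
  let right := if right = size then 0 else right
  ((right : Int), (continnum.getD right []).getD 2 0)

-- ===== PORT B =====
-- locate(seg): recursion on the physical sublist (Python slices seg[m+1:], seg[:m]).
def altLocate (h_ : Int) : Nat → List (List Int) → Nat
  | 0, _ => 0                     -- fuel only guards totality: seg.length ≤ fuel always holds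
  | fuel + 1, seg =>
    if seg.length = 0 then 0
    else
      let m := seg.length / 2
      if (seg.getD m []).getD 3 0 < h_ then
        m + 1 + altLocate h_ fuel (seg.drop (m + 1))
      else
        altLocate h_ fuel (seg.take m)

def find_near_value_alt (continnum : List (List Int)) (h_ : Int) : Int × Int :=
  let r := altLocate h_ continnum.length continnum
  let right := if r = continnum.length then 0 else r
  ((right : Int), (continnum.getD right []).getD 2 0)

-- ===== PRECONDITION & SPEC =====
-- Pre_ excludes the empty list and lists containing a row of fewer than 4 entries, on which
-- the Python A generally raises IndexError; on some such lists the short row is never probed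
-- and A still returns — B returns the same value there (see the cite in the claim).
def Pre_find_near_value (continnum : List (List Int)) (h_ : Int) : Prop :=
  continnum ≠ [] ∧ ∀ row ∈ continnum, 4 ≤ row.length
instance (continnum : List (List Int)) (h_ : Int) : Decidable (Pre_find_near_value continnum h_) := by unfold Pre_find_near_value; infer_instance

def pvWitness_find_near_value : List (List Int) × Int := ([[0, 0, 5, 10], [1, 1, 7, 20]], 15)

def Spec_find_near_value (continnum : List (List Int)) (h_ : Int) (out : Int × Int) : Prop := out = find_near_value_alt continnum h_
instance (continnum : List (List Int)) (h_ : Int) (out : Int × Int) : Decidable (Spec_find_near_value continnum h_ out) := by unfold Spec_find_near_value; infer_instance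

-- ===== CLAIM (what is proved, stated in full; the proofs are below) =====
def Claim_equal_find_near_value : Prop := ∀ (continnum : List (List Int)) (h_ : Int), Dom_find_near_value continnum h_ → Pre_find_near_value continnum h_ → Spec_find_near_value continnum h_ (find_near_value continnum h_)

-- ===== LEMMAS AND PROOFS =====

-- With equal fuel, the index-pair loop on [lo, hi) computes lo + (B's recursion on c[lo:hi]).
lemma aLoop_eq_altLocate (c : List (List Int)) (h_ : Int) :
    ∀ (n lo hi : Nat), hi - lo ≤ n → lo ≤ hi → hi ≤ c.length →
      aLoop c h_ n lo hi = lo + altLocate h_ n ((c.drop lo).take (hi - lo)) := by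
  intro n
  induction n with
  | zero =>
      intro lo hi hn hle hhi
      have : hi = lo := by omega
      subst this
      simp [aLoop, altLocate]
  | succ n ih =>
      intro lo hi hn hle hhi
      have hseglen : ((c.drop lo).take (hi - lo)).length = hi - lo := by
        simp [List.length_take, List.length_drop]; omega
      by_cases hlt : lo < hi
      · have hm : (hi - lo) / 2 < hi - lo := by omega
        have hkey : (((c.drop lo).take (hi - lo)).getD ((hi - lo) / 2) []) =
            (c.getD (lo + (hi - lo) / 2) []) := by
          rw [List.getD_eq_getElem _ _ (by omega), List.getD_eq_getElem _ _ (by omega)]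
          rw [List.getElem_take, List.getElem_drop]
        rw [aLoop, altLocate]
        simp only [hseglen, hkey, if_pos hlt]
        rw [if_neg (by omega : ¬ (hi - lo = 0))]
        by_cases hb : (c.getD (lo + (hi - lo) / 2) []).getD 3 0 < h_
        · rw [if_pos hb, if_pos hb]
          rw [ih (lo + (hi - lo) / 2 + 1) hi (by omega) (by omega) hhi]
          have hdrop : ((c.drop lo).take (hi - lo)).drop ((hi - lo) / 2 + 1) =
              (c.drop (lo + (hi - lo) / 2 + 1)).take (hi - (lo + (hi - lo) / 2 + 1)) := by
            have e1 : hi - lo - ((hi - lo) / 2 + 1) = hi - (lo + (hi - lo) / 2 + 1) := by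
              omega
            rw [List.drop_take, List.drop_drop, e1]
            congr 1
          rw [hdrop]
          omega
        · rw [if_neg hb, if_neg hb]
          rw [ih lo (lo + (hi - lo) / 2) (by omega) (by omega) (by omega)]
          have htake : ((c.drop lo).take (hi - lo)).take ((hi - lo) / 2) =
              (c.drop lo).take (lo + (hi - lo) / 2 - lo) := by
            rw [List.take_take]
            congr 1
            omega
          rw [htake]
      · have : hi = lo := by omega
        subst this
        rw [aLoop, altLocate]
        simp
lemma aLoop_len (c : List (List Int)) (h_ : Int) :
    aLoop c h_ c.length 0 c.length = altLocate h_ c.length c := by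
  have := aLoop_eq_altLocate c h_ c.length 0 c.length (by omega) (by omega) (by omega)
  simpa using this

-- ===== VERDICT (by name: the statement is the Claim_ definition above) =====
theorem find_near_value_spec : Claim_equal_find_near_value := by
  intro continnum h_ _ _
  unfold Spec_find_near_value find_near_value find_near_value_alt
  simp only [aLoop_len]
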